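-- pv_equiv track=rewrite | github.com/devyaanshdwivedi/GFG_SDE_SHEET | Special Keyboard.py | optimalKeys
-- ===== SOURCE A (Python) =====
-- def optimalKeys(N):
--     dp = [ 0 for i in range(N+1) ]
--
--     for i in range(1, N+1):
--         dp[i] = dp[i-1] + 1
--         j = 2
--         while j < i:
--             dp[i] = max(dp[i], dp[j-2] * (i - j + 1))
--             j += 1
--
--     return dp[N]
-- ===== SOURCE B (Python) =====
-- def optimalKeys(N):
--     # Sliding six-value window: multipliers >= 6 are dominated, so only
--     # dp[i-1]+1, 2*dp[i-3], 3*dp[i-4], 4*dp[i-5], 5*dp[i-6] can be optimal.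
--     # O(N) time, O(1) space; no dp array at all.
--     w0 = w1 = w2 = w3 = w4 = w5 = 0
--     for _ in range(N):
--         best = max(w5 + 1, 2 * w3, 3 * w2, 4 * w1, 5 * w0)
--         w0, w1, w2, w3, w4, w5 = w1, w2, w3, w4, w5, best
--     return w5
-- ===== Notes on version B (the rewrite author's own statement) =====
-- stated objective: faster
-- what changed: Replaces the dp array with O(N^2) scan over all break points by a six-value sliding window updated in O(1) per step (multipliers >= 6 are dominated by multiplier m-3 three cells later), giving O(N) time and O(1) space.
import Mathlib
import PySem

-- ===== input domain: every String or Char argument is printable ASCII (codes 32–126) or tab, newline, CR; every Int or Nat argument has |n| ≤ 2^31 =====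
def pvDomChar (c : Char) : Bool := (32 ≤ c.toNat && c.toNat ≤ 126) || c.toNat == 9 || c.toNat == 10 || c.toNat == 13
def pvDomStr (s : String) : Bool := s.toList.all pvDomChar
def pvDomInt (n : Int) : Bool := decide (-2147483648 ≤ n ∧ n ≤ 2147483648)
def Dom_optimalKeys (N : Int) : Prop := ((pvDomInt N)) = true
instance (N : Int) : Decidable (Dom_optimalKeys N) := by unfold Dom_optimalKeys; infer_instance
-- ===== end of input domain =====

-- B drops the dp array and the O(N^2) break-point scan for a six-value sliding window updated in O(1) per step (asymptotically faster).

-- ===== PORT A =====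
-- literal port of A: dp[i] = dp[i-1]+1; while j < i: dp[i] = max(dp[i], dp[j-2]*(i-j+1)); return dp[N]
def optimalKeys (N : Int) : Int :=
  let n : Nat := (N + 1).toNat
  let dp : List Int := List.replicate n 0
  let dp := (List.range' 1 (n - 1)).foldl (fun dp i =>
      (List.range' 2 (i - 2)).foldl
        (fun dp j => dp.set i (max (dp.getD i 0) (dp.getD (j - 2) 0 * ((i : Int) - (j : Int) + 1))))
        (dp.set i (dp.getD (i - 1) 0 + 1))) dp
  (PySem.List.pyGet? dp N).getD 0

-- ===== PORT B =====
-- port of B: six scalars w0..w5; best = max(w5+1, 2*w3, 3*w2, 4*w1, 5*w0); shift the window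
def optimalKeys_alt (N : Int) : Int :=
  let w : Int × Int × Int × Int × Int × Int := (0, 0, 0, 0, 0, 0)
  let w := (List.range N.toNat).foldl (fun w (_ : Nat) =>
      match w with
      | (w0, w1, w2, w3, w4, w5) =>
        let best := max (max (max (max (w5 + 1) (2 * w3)) (3 * w2)) (4 * w1)) (5 * w0)
        (w1, w2, w3, w4, w5, best)) w
  w.2.2.2.2.2

-- ===== PRECONDITION & SPEC =====
-- For N < 0 the Python A raises IndexError (dp is empty, dp[N] fails); those inputs are excluded.
def Pre_optimalKeys (N : Int) : Prop := 0 ≤ N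
instance (N : Int) : Decidable (Pre_optimalKeys N) := by unfold Pre_optimalKeys; infer_instance
def pvWitness_optimalKeys : Int := 7

def Spec_optimalKeys (N : Int) (out : Int) : Prop := out = optimalKeys_alt N
instance (N : Int) (out : Int) : Decidable (Spec_optimalKeys N out) := by unfold Spec_optimalKeys; infer_instance

-- ===== CLAIM (what is proved, stated in full; the proofs are below) =====
def Claim_equal_optimalKeys : Prop := ∀ (N : Int), Dom_optimalKeys N → Pre_optimalKeys N → Spec_optimalKeys N (optimalKeys N)

-- ===== LEMMAS AND PROOFS =====

-- B's step function, named for the proofs (defeq to the lambda body in the port)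
def pvB (w : Int × Int × Int × Int × Int × Int) : Int × Int × Int × Int × Int × Int :=
  match w with
  | (w0, w1, w2, w3, w4, w5) =>
    let best := max (max (max (max (w5 + 1) (2 * w3)) (3 * w2)) (4 * w1)) (5 * w0)
    (w1, w2, w3, w4, w5, best)

-- the window of dp at position i
def pvWin (dp : List Int) (i : Nat) : Int × Int × Int × Int × Int × Int :=
  (dp.getD (i - 6) 0, dp.getD (i - 5) 0, dp.getD (i - 4) 0,
   dp.getD (i - 3) 0, dp.getD (i - 2) 0, dp.getD (i - 1) 0)

-- the value B assigns at position i, read off dp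
def pvBval (dp : List Int) (i : Nat) : Int :=
  max (max (max (max (dp.getD (i - 1) 0 + 1) (2 * dp.getD (i - 3) 0))
    (3 * dp.getD (i - 4) 0)) (4 * dp.getD (i - 5) 0)) (5 * dp.getD (i - 6) 0)

-- invariant: prefix entries nonnegative, dp[k+3] >= 2*dp[k], dp[0] = 0
def pvInv (dp : List Int) (i : Nat) : Prop :=
  (∀ k, k < i → 0 ≤ dp.getD k 0) ∧ (∀ k, k + 3 < i → 2 * dp.getD k 0 ≤ dp.getD (k + 3) 0) ∧
  dp.getD 0 0 = 0

theorem pvGetDSetNe (dp : List Int) (i k : Nat) (v : Int) (h : k ≠ i) :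
    (dp.set i v).getD k 0 = dp.getD k 0 := by
  simp only [List.getD]
  rw [List.getElem?_set_ne (by omega)]

theorem pvGetDSetEq (dp : List Int) (i : Nat) (v : Int) (h : i < dp.length) :
    (dp.set i v).getD i 0 = v := by
  simp [List.getD, List.getElem?_set_self h]

-- A's inner loop only mutates index i; reads are at j-2 < i, so it is a max-accumulator on cell i.
theorem pvInnerSet (i : Nat) (l : List Nat) :
    ∀ (dp : List Int) (v : Int), (∀ j ∈ l, j < i) → i < dp.length →
    l.foldl (fun dp j => dp.set i (max (dp.getD i 0) (dp.getD (j - 2) 0 * ((i : Int) - (j : Int) + 1))))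
        (dp.set i v)
      = dp.set i (l.foldl (fun w j => max w (dp.getD (j - 2) 0 * ((i : Int) - (j : Int) + 1))) v) := by
  induction l with
  | nil => intro dp v _ _; rfl
  | cons j l ih =>
    intro dp v hall hi
    have hj : j < i := hall j (List.mem_cons_self ..)
    have h1 : (dp.set i v).set i (max ((dp.set i v).getD i 0)
        ((dp.set i v).getD (j - 2) 0 * ((i : Int) - (j : Int) + 1)))
        = dp.set i (max v (dp.getD (j - 2) 0 * ((i : Int) - (j : Int) + 1))) := by
      rw [List.set_set, pvGetDSetEq dp i v hi, pvGetDSetNe dp i (j - 2) v (by omega)]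
    simp only [List.foldl_cons, h1]
    exact ih dp _ (fun x hx => hall x (List.mem_cons_of_mem _ hx)) hi

theorem pvInitLe (h : Nat → Int) (l : List Nat) (v : Int) :
    v ≤ l.foldl (fun a x => max a (h x)) v := by
  induction l generalizing v with
  | nil => exact le_refl v
  | cons x l ih => exact le_trans (le_max_left v (h x)) (ih _)

theorem pvMemLe (h : Nat → Int) (l : List Nat) :
    ∀ (v : Int) (x : Nat), x ∈ l → h x ≤ l.foldl (fun a x => max a (h x)) v := by
  induction l with
  | nil => intro v x hx; cases hx
  | cons y l ih =>
    intro v x hx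
    rcases List.mem_cons.mp hx with rfl | hx'
    · exact le_trans (le_max_right v (h x)) (pvInitLe h l _)
    · exact ih _ x hx'

theorem pvAttained (h : Nat → Int) (l : List Nat) :
    ∀ v : Int, l.foldl (fun a x => max a (h x)) v = v ∨
      ∃ x ∈ l, l.foldl (fun a x => max a (h x)) v = h x := by
  induction l with
  | nil => intro v; exact Or.inl rfl
  | cons x l ih =>
    intro v
    rcases ih (max v (h x)) with heq | ⟨y, hy, heq⟩
    · simp only [List.foldl_cons] at *
      rcases max_choice v (h x) with h' | h'
      · exact Or.inl (heq.trans h')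
      · exact Or.inr ⟨x, List.mem_cons_self .., heq.trans h'⟩
    · exact Or.inr ⟨y, List.mem_cons_of_mem _ hy, heq⟩

-- any multiplier m in [2, i) is dominated by one of B's five window terms
theorem pvTermLe (dp : List Int) (i : Nat) (hinv : pvInv dp i) :
    ∀ m : Nat, 2 ≤ m → m < i → (m : Int) * dp.getD (i - m - 1) 0 ≤ pvBval dp i := by
  intro m
  induction m using Nat.strong_induction_on with
  | _ m ih =>
    intro hm2 hmi
    by_cases h6 : m < 6
    · have : m = 2 ∨ m = 3 ∨ m = 4 ∨ m = 5 := by omega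
      unfold pvBval
      rcases this with rfl | rfl | rfl | rfl
      · have : i - 2 - 1 = i - 3 := by omega
        rw [this]; push_cast; omega
      · have : i - 3 - 1 = i - 4 := by omega
        rw [this]; push_cast; omega
      · have : i - 4 - 1 = i - 5 := by omega
        rw [this]; push_cast; omega
      · have : i - 5 - 1 = i - 6 := by omega
        rw [this]; push_cast; omega
    · have hstep : (m : Int) * dp.getD (i - m - 1) 0
          ≤ ((m - 3 : Nat) : Int) * dp.getD (i - (m - 3) - 1) 0 := by
        have hidx : i - (m - 3) - 1 = (i - m - 1) + 3 := by omega
        rw [hidx]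
        have hg := hinv.2.1 (i - m - 1) (by omega)
        have hp := hinv.1 (i - m - 1) (by omega)
        have hc : ((m - 3 : Nat) : Int) = (m : Int) - 3 := by omega
        rw [hc]
        have hm6 : (6 : Int) ≤ (m : Int) := by exact_mod_cast Nat.le_of_not_lt h6
        nlinarith [hg, hp, hm6]
      exact le_trans hstep (ih (m - 3) (by omega) (by omega) (by omega))

-- A's inner fold (as accumulator) equals B's five-way max
theorem pvStepEq (dp : List Int) (i : Nat) (hi : 1 ≤ i) (hinv : pvInv dp i) :
    (List.range' 2 (i - 2)).foldl
        (fun w j => max w (dp.getD (j - 2) 0 * ((i : Int) - (j : Int) + 1)))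
        (dp.getD (i - 1) 0 + 1)
      = pvBval dp i := by
  have hnn : 0 ≤ dp.getD (i - 1) 0 := hinv.1 (i - 1) (by omega)
  apply le_antisymm
  · rcases pvAttained (fun j => dp.getD (j - 2) 0 * ((i : Int) - (j : Int) + 1))
        (List.range' 2 (i - 2)) (dp.getD (i - 1) 0 + 1) with heq | ⟨j, hj, heq⟩
    · rw [heq]; unfold pvBval; omega
    · rw [heq]
      rw [List.mem_range'_1] at hj
      have hterm : dp.getD (j - 2) 0 * ((i : Int) - (j : Int) + 1)
          = ((i - j + 1 : Nat) : Int) * dp.getD (i - (i - j + 1) - 1) 0 := by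
        have h1 : i - (i - j + 1) - 1 = j - 2 := by omega
        have h2 : (((i - j + 1 : Nat)) : Int) = (i : Int) - (j : Int) + 1 := by omega
        rw [h1, h2]; ring
      rw [hterm]
      exact pvTermLe dp i hinv (i - j + 1) (by omega) (by omega)
  · -- each of B's terms is either A's init, one of A's terms, or 0 (via dp[0]=0)
    have hinit := pvInitLe (fun j => dp.getD (j - 2) 0 * ((i : Int) - (j : Int) + 1))
        (List.range' 2 (i - 2)) (dp.getD (i - 1) 0 + 1)
    have hterm : ∀ m : Nat, 2 ≤ m → m ≤ 5 →
        (m : Int) * dp.getD (i - m - 1) 0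
          ≤ (List.range' 2 (i - 2)).foldl
              (fun w j => max w (dp.getD (j - 2) 0 * ((i : Int) - (j : Int) + 1)))
              (dp.getD (i - 1) 0 + 1) := by
      intro m hm2 hm5
      by_cases hmi : m < i
      · have heq : (m : Int) * dp.getD (i - m - 1) 0
            = dp.getD ((i - m + 1) - 2) 0 * ((i : Int) - ((i - m + 1 : Nat) : Int) + 1) := by
          have h1 : (i - m + 1) - 2 = i - m - 1 := by omega
          have h2 : ((i : Int) - ((i - m + 1 : Nat) : Int) + 1) = (m : Int) := by omega
          rw [h1, h2]; ring
        rw [heq]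
        exact pvMemLe _ _ _ (i - m + 1) (by rw [List.mem_range'_1]; omega)
      · have h0 : i - m - 1 = 0 := by omega
        rw [h0, hinv.2.2]
        have : ((m : Int)) * 0 = 0 := by ring
        rw [this]; omega
    have h2 := hterm 2 (by omega) (by omega)
    have h3 := hterm 3 (by omega) (by omega)
    have h4 := hterm 4 (by omega) (by omega)
    have h5 := hterm 5 (by omega) (by omega)
    have e2 : i - 2 - 1 = i - 3 := by omega
    have e3 : i - 3 - 1 = i - 4 := by omega
    have e4 : i - 4 - 1 = i - 5 := by omega
    have e5 : i - 5 - 1 = i - 6 := by omega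
    rw [e2] at h2; rw [e3] at h3; rw [e4] at h4; rw [e5] at h5
    unfold pvBval
    push_cast at h2 h3 h4 h5
    omega

-- the invariant is preserved by one step
theorem pvInvStep (dp : List Int) (i : Nat) (hi : 1 ≤ i) (hlen : i < dp.length)
    (hinv : pvInv dp i) : pvInv (dp.set i (pvBval dp i)) (i + 1) := by
  have hnn : 0 ≤ dp.getD (i - 1) 0 := hinv.1 (i - 1) (by omega)
  have hv0 : dp.getD (i - 1) 0 + 1 ≤ pvBval dp i := by unfold pvBval; omega
  refine ⟨?_, ?_, ?_⟩
  · intro k hk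
    by_cases hki : k = i
    · rw [hki, pvGetDSetEq dp i _ hlen]; omega
    · rw [pvGetDSetNe dp i k _ hki]; exact hinv.1 k (by omega)
  · intro k hk
    by_cases hki : k + 3 = i
    · rw [hki, pvGetDSetEq dp i _ hlen, pvGetDSetNe dp i k _ (by omega)]
      have hk3 : k = i - 3 := by omega
      rw [hk3]; unfold pvBval; omega
    · rw [pvGetDSetNe dp i k _ (by omega), pvGetDSetNe dp i (k + 3) _ hki]
      exact hinv.2.1 k (by omega)
  · rw [pvGetDSetNe dp i 0 _ (by omega)]; exact hinv.2.2

-- one B step on the window equals one A step on dp, window-read at i+1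
theorem pvBStepWin (dp : List Int) (i : Nat) (hi : 1 ≤ i) (hlen : i < dp.length) :
    pvB (pvWin dp i) = pvWin (dp.set i (pvBval dp i)) (i + 1) := by
  unfold pvB pvWin pvBval
  have h5 : i + 1 - 6 = i - 5 := by omega
  have h4 : i + 1 - 5 = i - 4 := by omega
  have h3 : i + 1 - 4 = i - 3 := by omega
  have h2 : i + 1 - 3 = i - 2 := by omega
  have h1 : i + 1 - 2 = i - 1 := by omega
  have h0 : i + 1 - 1 = i := by omega
  rw [h5, h4, h3, h2, h1, h0]
  rw [pvGetDSetNe dp i (i - 5) _ (by omega), pvGetDSetNe dp i (i - 4) _ (by omega),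
      pvGetDSetNe dp i (i - 3) _ (by omega), pvGetDSetNe dp i (i - 2) _ (by omega),
      pvGetDSetNe dp i (i - 1) _ (by omega), pvGetDSetEq dp i _ hlen]

-- a fold whose function ignores the element is iteration
theorem pvFoldlConst {α β : Type} (f : α → α) (l : List β) (s : α) :
    l.foldl (fun a _ => f a) s = f^[l.length] s := by
  induction l generalizing s with
  | nil => rfl
  | cons x l ih => simp only [List.foldl_cons, List.length_cons, Function.iterate_succ_apply, ih]

-- the main simulation: iterating B's step tracks the window of A's dp
theorem pvMain (cnt : Nat) : ∀ (i : Nat) (dp : List Int), 1 ≤ i → i + cnt ≤ dp.length →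
    pvInv dp i →
    pvB^[cnt] (pvWin dp i)
      = pvWin ((List.range' i cnt).foldl (fun dp i =>
          (List.range' 2 (i - 2)).foldl
            (fun dp j => dp.set i (max (dp.getD i 0) (dp.getD (j - 2) 0 * ((i : Int) - (j : Int) + 1))))
            (dp.set i (dp.getD (i - 1) 0 + 1))) dp) (i + cnt) := by
  induction cnt with
  | zero => intro i dp _ _ _; rfl
  | succ c ih =>
    intro i dp hi hlen hinv
    have hilen : i < dp.length := by omega
    rw [List.range'_succ]
    simp only [List.foldl_cons, Function.iterate_succ_apply]
    have hA : (List.range' 2 (i - 2)).foldl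
        (fun dp j => dp.set i (max (dp.getD i 0) (dp.getD (j - 2) 0 * ((i : Int) - (j : Int) + 1))))
        (dp.set i (dp.getD (i - 1) 0 + 1))
        = dp.set i (pvBval dp i) := by
      rw [pvInnerSet i (List.range' 2 (i - 2)) dp _
        (by intro j hj; rw [List.mem_range'_1] at hj; omega) hilen]
      rw [pvStepEq dp i hi hinv]
    rw [hA, pvBStepWin dp i hi hilen]
    have := ih (i + 1) (dp.set i (pvBval dp i)) (by omega)
      (by rw [List.length_set]; omega) (pvInvStep dp i hi hilen hinv)
    rw [this]
    congr 1
    omega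

theorem pvInvInit (n : Nat) : pvInv (List.replicate n (0 : Int)) 1 := by
  refine ⟨?_, ?_, ?_⟩
  · intro k _
    rcases Nat.lt_or_ge k n with h | h
    · simp [List.getD, h]
    · simp [List.getD, List.getElem?_eq_none (by simpa using h : (List.replicate n (0 : Int)).length ≤ k)]
  · intro k hk; omega
  · rcases Nat.eq_zero_or_pos n with h | h
    · subst h; rfl
    · simp [List.getD, h]

-- ===== VERDICT (by name: the statement is the Claim_ definition above) =====
theorem optimalKeys_spec : Claim_equal_optimalKeys := by
  intro N _ hpre
  unfold Pre_optimalKeys at hpre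
  have hn : 1 ≤ (N + 1).toNat := by omega
  set n : Nat := (N + 1).toNat with hndef
  have hcnt : n - 1 = N.toNat := by omega
  unfold Spec_optimalKeys optimalKeys optimalKeys_alt
  simp only []
  -- rewrite B's fold as an iterate of pvB
  rw [show (fun (w : Int × Int × Int × Int × Int × Int) (_ : Nat) =>
      match w with
      | (w0, w1, w2, w3, w4, w5) =>
        let best := max (max (max (max (w5 + 1) (2 * w3)) (3 * w2)) (4 * w1)) (5 * w0)
        (w1, w2, w3, w4, w5, best)) = (fun w (_ : Nat) => pvB w) from rfl]
  rw [pvFoldlConst pvB (List.range N.toNat) (0, 0, 0, 0, 0, 0), List.length_range]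
  -- the initial window is all zeros
  have hwin0 : pvWin (List.replicate n 0) 1 = (0, 0, 0, 0, 0, 0) := by
    unfold pvWin
    have hpos : 0 < n := hn
    simp [List.getD, hpos]
  rw [← hcnt, ← hwin0]
  rw [pvMain (n - 1) 1 (List.replicate n 0) (le_refl 1)
      (by rw [List.length_replicate]; omega) (pvInvInit n)]
  -- both sides now read the final dp at index n-1 = N.toNat
  set dpF := (List.range' 1 (n - 1)).foldl (fun dp i =>
      (List.range' 2 (i - 2)).foldl
        (fun dp j => dp.set i (max (dp.getD i 0) (dp.getD (j - 2) 0 * ((i : Int) - (j : Int) + 1))))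
        (dp.set i (dp.getD (i - 1) 0 + 1))) (List.replicate n 0) with hdpF
  have hlen : dpF.length = n := by
    rw [hdpF]
    have inner : ∀ (i : Nat) (l : List Nat) (dp : List Int),
        (l.foldl (fun dp j => dp.set i (max (dp.getD i 0) (dp.getD (j - 2) 0 * ((i : Int) - (j : Int) + 1)))) dp).length = dp.length := by
      intro i l
      induction l with
      | nil => intro dp; rfl
      | cons j l ih => intro dp; rw [List.foldl_cons, ih, List.length_set]
    have outer : ∀ (l : List Nat) (dp : List Int),
        (l.foldl (fun dp i =>
          (List.range' 2 (i - 2)).foldl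
            (fun dp j => dp.set i (max (dp.getD i 0) (dp.getD (j - 2) 0 * ((i : Int) - (j : Int) + 1))))
            (dp.set i (dp.getD (i - 1) 0 + 1))) dp).length = dp.length := by
      intro l
      induction l with
      | nil => intro dp; rfl
      | cons i l ih => intro dp; rw [List.foldl_cons, ih, inner, List.length_set]
    rw [outer, List.length_replicate]
  have hidx : N.toNat < dpF.length := by omega
  rw [PySem.List.pyGet?_of_nonneg dpF hpre]
  unfold pvWin
  have h1 : 1 + (n - 1) - 1 = N.toNat := by omega
  rw [h1]
  simp [List.getD, List.getElem?_eq_getElem hidx]
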